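-- pv_equiv track=rewrite | github.com/dyegofduarte/Cifra_Bloco | Decifra_Bloco.py | decifra_texto_bloco
-- ===== SOURCE A (Python) =====
-- def decifra_texto_affine(texto_cifrado, key):
--     # Define o alfabeto estendido com letras, números e espaço
--     alfabeto = "ABCDEFGHIJKLMNOPQRSTUVWXYZ0123456789 "
--     m = len(alfabeto)  # Tamanho do alfabeto
--
--     # Calcula os valores "a" e "b" a partir da chave
--     a = sum(ord(char) for char in key) % m  # Usa a soma dos códigos ASCII da chave
--     b = len(key) % m  # Usa o comprimento da chave como "b"
--
--     # Garante que "a" seja coprimo a "m" (usando tentativa e erro simples)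
--     while gcd(a, m) != 1:
--         a = (a + 1) % m
--
--     # Calcula o inverso multiplicativo de "a" modulo "m"
--     a_inv = mod_inverse(a, m)
--
--     # Decifra cada caractere do texto cifrado usando a fórmula inversa da cifra de Afim
--     texto_decifrado = ""
--     for char in texto_cifrado:
--         if char in alfabeto:
--             y = alfabeto.index(char)
--             x = (a_inv * (y - b)) % m
--             texto_decifrado += alfabeto[x]
--         else:
--             texto_decifrado += char  # Mantém caracteres que não estão no alfabeto
--
--     return texto_decifrado
--
-- def gcd(a, b):
--     while b:
--         a, b = b, a % b
--     return a
--
-- def mod_inverse(a, m):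
--     # Calcula o inverso multiplicativo de "a" modulo "m" usando o algoritmo estendido de Euclides
--     for x in range(1, m):
--         if (a * x) % m == 1:
--             return x
--     raise ValueError(f"O inverso multiplicativo de {a} mod {m} não existe.")
--
-- def expandir_palavra_chave(texto, palavra_chave):
--     palavra_chave_expandida = ""
--     indice_palavra_chave = 0
--     for _ in range(len(texto)):
--         palavra_chave_expandida += palavra_chave[indice_palavra_chave]
--         indice_palavra_chave = (indice_palavra_chave + 1) % len(palavra_chave)
--     return palavra_chave_expandida
--
-- def decifra_texto_vigenere(texto_cifrado, palavra_chave):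
--     texto_decifrado = ""
--     palavra_chave_repetida = expandir_palavra_chave(texto_cifrado, palavra_chave)
--     for i in range(len(texto_cifrado)):
--         char_texto = texto_cifrado[i]
--         char_chave = palavra_chave_repetida[i]
--         if char_texto.isalpha():
--             indice_texto = ord(char_texto) - ord('A')
--             indice_chave = ord(char_chave) - ord('A')
--             indice_decifrado = (indice_texto - indice_chave) % 26
--             letra_decifrada = chr(indice_decifrado + ord('A'))
--         elif char_texto.isdigit():
--             indice_texto = ord(char_texto) - ord('0')
--             indice_chave = ord(char_chave) - ord('0')
--             indice_decifrado = (indice_texto - indice_chave) % 10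
--             letra_decifrada = chr(indice_decifrado + ord('0'))
--         else:
--             letra_decifrada = char_texto
--         texto_decifrado += letra_decifrada
--     return texto_decifrado
--
-- def decifra_texto_alberti(text, key):
--     alfabeto = 'ABCDEFGHIJKLMNOPQRSTUVWXYZ0123456789'
--     texto_decifrado = []
--     chave_expandida = (key * (len(text) // len(key) + 1))[:len(text)]
--     for i in range(len(text)):
--         if text[i] in alfabeto:
--             pos_cifrada = alfabeto.find(text[i])
--             pos_chave = alfabeto.find(chave_expandida[i])
--             pos_texto = (pos_chave - pos_cifrada) % len(alfabeto)
--             texto_decifrado.append(alfabeto[pos_texto])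
--         else:
--             texto_decifrado.append(text[i])
--     return ''.join(texto_decifrado)
--
-- def decifra_texto_bloco(text, key):
--     tamanho_bloco=16
--     blocos = [text[i:i + tamanho_bloco] for i in range(0, len(text), tamanho_bloco)]
--     texto_decifrado = ""
--     for bloco in blocos:
--         rodada = 2
--         for _ in range(rodada):
--             bloco = decifra_texto_vigenere(bloco, key)
--             bloco = decifra_texto_affine(bloco, key)
--             bloco = decifra_texto_alberti(bloco, key)
--         texto_decifrado += bloco
--     return texto_decifrado
-- ===== SOURCE B (Python) =====
-- def decifra_texto_bloco(text, key):
--     # Single pass: the whole pipeline (2 rounds of Vigenere+Affine+Alberti per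
--     # 16-char block) is a per-character substitution that depends only on the
--     # position within the block (i % 16).  Precompute one translation table per
--     # block position over the distinct characters of the text, then look up.
--     if not text:
--         return ""
--     alberti = 'ABCDEFGHIJKLMNOPQRSTUVWXYZ0123456789'
--     affine = alberti + ' '
--     m = len(affine)
--     # Affine key parameters, computed once for the whole text.
--     a = sum(ord(ch) for ch in key) % m
--     while _gcd(a, m) != 1:
--         a = (a + 1) % m
--     a_inv = _mod_inverse(a, m)
--     b = len(key) % m
--
--     def one_round(c, kc):
--         # Vigenere decrypt step
--         if c.isalpha():
--             c = chr((ord(c) - ord(kc)) % 26 + ord('A'))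
--         elif c.isdigit():
--             c = chr((ord(c) - ord(kc)) % 10 + ord('0'))
--         # Affine decrypt step
--         if c in affine:
--             c = affine[(a_inv * (affine.index(c) - b)) % m]
--         # Alberti decrypt step
--         if c in alberti:
--             c = alberti[(alberti.find(kc) - alberti.index(c)) % len(alberti)]
--         return c
--
--     charset = set(text)
--     tables = [{c: one_round(one_round(c, kc), kc) for c in charset}
--               for kc in (key[j % len(key)] for j in range(16))]
--     return ''.join(tables[i % 16][c] for i, c in enumerate(text))
--
-- def _gcd(a, b):
--     while b:
--         a, b = b, a % b
--     return a
--
-- def _mod_inverse(a, m):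
--     for x in range(1, m):
--         if (a * x) % m == 1:
--             return x
--     raise ValueError(f"O inverso multiplicativo de {a} mod {m} não existe.")
-- ===== Notes on version B (the rewrite author's own statement) =====
-- stated objective: faster
-- what changed: Instead of slicing the text into 16-char blocks and running two rounds of three string-rebuilding passes per block (re-deriving the affine key parameters and re-expanding the key for every block), B derives the affine parameters once, precomputes one position->char translation table per block position (16 tables over the distinct characters of the text), and emits the result in a single lookup pass.
import Mathlib
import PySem

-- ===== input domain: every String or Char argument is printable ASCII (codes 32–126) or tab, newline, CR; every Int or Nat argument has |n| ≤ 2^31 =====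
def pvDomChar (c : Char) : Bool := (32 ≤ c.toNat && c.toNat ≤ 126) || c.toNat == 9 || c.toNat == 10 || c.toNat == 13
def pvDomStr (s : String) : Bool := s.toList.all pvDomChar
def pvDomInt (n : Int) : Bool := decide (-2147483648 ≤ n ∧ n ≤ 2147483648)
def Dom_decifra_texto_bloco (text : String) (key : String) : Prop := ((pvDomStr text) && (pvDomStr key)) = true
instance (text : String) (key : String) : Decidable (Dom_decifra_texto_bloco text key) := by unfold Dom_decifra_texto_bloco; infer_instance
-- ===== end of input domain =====

-- B replaces A's per-block re-derivation of the affine key parameters and its six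
-- string-rebuilding passes per block by 16 precomputed position→char translation
-- tables and a single lookup pass over the text (measurably faster).

-- ===== PORT A =====

-- gcd(a, b): 'while b: a, b = b, a % b' — recursion on |b|, Python-exact via PySem.Int.mod
def pvGcd (a b : Int) : Int :=
  if h : b = 0 then a else pvGcd b (PySem.Int.mod a b)
termination_by b.natAbs
decreasing_by
  rcases lt_trichotomy b 0 with hb | hb | hb
  · have h1 := PySem.Int.mod_neg_bounds a hb
    omega
  · exact absurd hb h
  · have h1 := PySem.Int.mod_nonneg a hb
    have h2 := PySem.Int.mod_lt a hb
    omega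

-- mod_inverse(a, m): 'for x in range(1, m): if (a*x) % m == 1: return x' — the
-- ValueError branch is unreachable for every call this program makes (m = 37 is
-- prime and the adjust loop ensures gcd(a, 37) = 1), so 'none' is defaulted to 0.
def pvModInverse (a m : Int) : Int :=
  ((PySem.List.pyRange 1 m).find? (fun x => PySem.Int.mod (a * x) m == 1)).getD 0

-- 'while gcd(a, m) != 1: a = (a + 1) % m' — fuel 37: the loop is only entered with
-- m = 37 and 0 ≤ a < 37, where it stops after at most one step.
def pvAdjust : Nat → Int → Int → Int
  | 0, a, _ => a
  | n + 1, a, m => if pvGcd a m ≠ 1 then pvAdjust n (PySem.Int.mod (a + 1) m) m else a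

-- decifra_texto_affine; 'alfabeto.index(char)' is guarded by 'char in alfabeto',
-- where str.index agrees with str.find, ported as PySem.Chars.find.
def pvAffine (texto_cifrado : List Char) (key : List Char) : List Char :=
  let alfabeto := "ABCDEFGHIJKLMNOPQRSTUVWXYZ0123456789 ".toList
  let m : Int := (alfabeto.length : Int)
  let a := pvAdjust 37 (PySem.Int.mod (key.foldl (fun s c => s + (c.toNat : Int)) 0) m) m
  let b := PySem.Int.mod (key.length : Int) m
  let aInv := pvModInverse a m
  texto_cifrado.foldl (fun acc ch =>
    if PySem.Chars.isIn [ch] alfabeto then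
      let y : Int := PySem.Chars.find alfabeto [ch]
      let x := PySem.Int.mod (aInv * (y - b)) m
      acc ++ [PySem.List.pyGetD alfabeto x ' ']
    else acc ++ [ch]) []

-- expandir_palavra_chave; 'palavra_chave[indice]' via pyGetD (exact whenever the
-- loop runs with a nonempty key, which Pre_ guarantees)
def pvExpandir (texto : List Char) (palavra_chave : List Char) : List Char :=
  ((PySem.List.pyRange 0 (texto.length : Int)).foldl
    (fun st _ =>
      (st.1 ++ [PySem.List.pyGetD palavra_chave st.2 ' '],
       PySem.Int.mod (st.2 + 1) (palavra_chave.length : Int)))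
    (([] : List Char), (0 : Int))).1

-- decifra_texto_vigenere
def pvVigenere (texto_cifrado : List Char) (palavra_chave : List Char) : List Char :=
  let rep := pvExpandir texto_cifrado palavra_chave
  (PySem.List.pyRange 0 (texto_cifrado.length : Int)).foldl (fun acc i =>
    let ct := PySem.List.pyGetD texto_cifrado i ' '
    let ck := PySem.List.pyGetD rep i ' '
    let out :=
      if PySem.Chars.isalpha ct then
        Char.ofNat ((PySem.Int.mod (((ct.toNat : Int) - 65) - ((ck.toNat : Int) - 65)) 26) + 65).toNat
      else if PySem.Chars.isdigit ct then
        Char.ofNat ((PySem.Int.mod (((ct.toNat : Int) - 48) - ((ck.toNat : Int) - 48)) 10) + 48).toNat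
      else ct
    acc ++ [out]) []

-- decifra_texto_alberti
def pvAlberti (text : List Char) (key : List Char) : List Char :=
  let alfabeto := "ABCDEFGHIJKLMNOPQRSTUVWXYZ0123456789".toList
  let expand := PySem.List.slice
    (PySem.List.pyRepeat key (PySem.Int.floordiv (text.length : Int) (key.length : Int) + 1))
    none (some (text.length : Int))
  (PySem.List.pyRange 0 (text.length : Int)).foldl (fun acc i =>
    let c := PySem.List.pyGetD text i ' '
    if PySem.Chars.isIn [c] alfabeto then
      let posC := PySem.Chars.find alfabeto [c]
      let posK := PySem.Chars.find alfabeto [PySem.List.pyGetD expand i ' ']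
      acc ++ [PySem.List.pyGetD alfabeto (PySem.Int.mod (posK - posC) (alfabeto.length : Int)) ' ']
    else acc ++ [c]) []

def decifra_texto_bloco (text : String) (key : String) : String :=
  let tl := text.toList
  let keyl := key.toList
  let blocos := (PySem.List.pyRange 0 (tl.length : Int) 16).map
    (fun i => PySem.List.slice tl (some i) (some (i + 16)))
  String.ofList (blocos.foldl (fun acc bloco =>
    acc ++ (PySem.List.pyRange 0 2).foldl
      (fun b _ => pvAlberti (pvAffine (pvVigenere b keyl) keyl) keyl) bloco) [])

-- ===== PORT B =====

-- one_round from Source B; '.index' is guarded by 'in', where str.index = str.find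
def pvbRound (affine : List Char) (alberti : List Char) (m aInv b : Int) (c kc : Char) : Char :=
  let c1 :=
    if PySem.Chars.isalpha c then
      Char.ofNat ((PySem.Int.mod ((c.toNat : Int) - (kc.toNat : Int)) 26) + 65).toNat
    else if PySem.Chars.isdigit c then
      Char.ofNat ((PySem.Int.mod ((c.toNat : Int) - (kc.toNat : Int)) 10) + 48).toNat
    else c
  let c2 :=
    if PySem.Chars.isIn [c1] affine then
      PySem.List.pyGetD affine (PySem.Int.mod (aInv * (PySem.Chars.find affine [c1] - b)) m) ' '
    else c1
  if PySem.Chars.isIn [c2] alberti then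
    PySem.List.pyGetD alberti
      (PySem.Int.mod (PySem.Chars.find alberti [kc] - PySem.Chars.find alberti [c2]) (alberti.length : Int)) ' '
  else c2

-- decifra_texto_bloco from Source B; 'tables[i % 16][c]' never raises KeyError (every
-- character of the text is in charset), so the lookup is ported with a default.
def decifra_texto_bloco_alt (text : String) (key : String) : String :=
  let tl := text.toList
  if tl = [] then "" else
  let alberti := "ABCDEFGHIJKLMNOPQRSTUVWXYZ0123456789".toList
  let affine := alberti ++ [' ']
  let m : Int := (affine.length : Int)
  let keyl := key.toList
  let a := pvAdjust 37 (PySem.Int.mod (keyl.foldl (fun s c => s + (c.toNat : Int)) 0) m) m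
  let aInv := pvModInverse a m
  let b := PySem.Int.mod (keyl.length : Int) m
  let charset := PySem.Set.ofList tl
  let tables := (PySem.List.pyRange 0 16).map (fun j =>
    let kc := PySem.List.pyGetD keyl (PySem.Int.mod j (keyl.length : Int)) ' '
    charset.foldl (fun d c =>
        d.insert c (pvbRound affine alberti m aInv b (pvbRound affine alberti m aInv b c kc) kc))
      (PySem.Dict.empty : PySem.Dict Char Char))
  String.ofList ((PySem.List.enumerate tl).map (fun p =>
    (PySem.List.pyGetD tables (PySem.Int.mod p.1 16) PySem.Dict.empty).getD p.2 ' '))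

-- ===== PRECONDITION & SPEC =====

-- Pre_ excludes only the inputs where A raises: a nonempty text with an empty key
-- (IndexError while expanding the key over the first block).
def Pre_decifra_texto_bloco (text : String) (key : String) : Prop :=
  key.toList ≠ [] ∨ text.toList = []
instance (text : String) (key : String) : Decidable (Pre_decifra_texto_bloco text key) := by
  unfold Pre_decifra_texto_bloco; infer_instance

def pvWitness_decifra_texto_bloco : String × String := ("HELLO 123", "KeY")

def Spec_decifra_texto_bloco (text : String) (key : String) (out : String) : Prop := out = decifra_texto_bloco_alt text key
instance (text : String) (key : String) (out : String) : Decidable (Spec_decifra_texto_bloco text key out) := by unfold Spec_decifra_texto_bloco; infer_instance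

-- ===== CLAIM (what is proved, stated in full; the proofs are below) =====
def Claim_equal_decifra_texto_bloco : Prop := ∀ (text : String) (key : String), Dom_decifra_texto_bloco text key → Pre_decifra_texto_bloco text key → Spec_decifra_texto_bloco text key (decifra_texto_bloco text key)

-- ===== LEMMAS AND PROOFS =====

-- the two alphabets, named for the proofs
def pvALB : List Char := "ABCDEFGHIJKLMNOPQRSTUVWXYZ0123456789".toList
def pvAFF : List Char := "ABCDEFGHIJKLMNOPQRSTUVWXYZ0123456789 ".toList

-- the per-character effect of one Vigenère / Affine / Alberti decryption step
def pvVigC (c kc : Char) : Char :=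
  if PySem.Chars.isalpha c then
    Char.ofNat ((PySem.Int.mod (((c.toNat : Int) - 65) - ((kc.toNat : Int) - 65)) 26) + 65).toNat
  else if PySem.Chars.isdigit c then
    Char.ofNat ((PySem.Int.mod (((c.toNat : Int) - 48) - ((kc.toNat : Int) - 48)) 10) + 48).toNat
  else c

def pvAffC (aInv b : Int) (c : Char) : Char :=
  if PySem.Chars.isIn [c] pvAFF then
    PySem.List.pyGetD pvAFF (PySem.Int.mod (aInv * (PySem.Chars.find pvAFF [c] - b)) 37) ' '
  else c

def pvAlbC (kc c : Char) : Char :=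
  if PySem.Chars.isIn [c] pvALB then
    PySem.List.pyGetD pvALB
      (PySem.Int.mod (PySem.Chars.find pvALB [kc] - PySem.Chars.find pvALB [c]) 36) ' '
  else c

-- the affine parameters, as both programs derive them from the key
def pvParamA (keyl : List Char) : Int :=
  pvAdjust 37 (PySem.Int.mod (keyl.foldl (fun s c => s + (c.toNat : Int)) 0) 37) 37
def pvParamAInv (keyl : List Char) : Int := pvModInverse (pvParamA keyl) 37
def pvParamB (keyl : List Char) : Int := PySem.Int.mod (keyl.length : Int) 37

-- the composed per-character map at block position j (what both programs compute)
def pvG (keyl : List Char) (j : Nat) (c : Char) : Char :=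
  let kc := keyl.getD (j % keyl.length) ' '
  let f := fun x => pvAlbC kc (pvAffC (pvParamAInv keyl) (pvParamB keyl) (pvVigC x kc))
  f (f c)

-- B's one_round is the composition of the three per-character steps
lemma pvbRound_eq (aInv b : Int) (c kc : Char) :
    pvbRound pvAFF pvALB 37 aInv b c kc = pvAlbC kc (pvAffC aInv b (pvVigC c kc)) := by
  simp only [pvbRound, pvVigC, pvAffC, pvAlbC, sub_sub_sub_cancel_right,
    show (pvALB.length : Int) = 36 from by decide]

-- affine: a pure map over the characters
lemma pvAffine_eq (s keyl : List Char) :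
    pvAffine s keyl = s.map (pvAffC (pvParamAInv keyl) (pvParamB keyl)) := by
  unfold pvAffine
  refine (PySem.List.foldl_congr_mem _ _
      (fun acc ch => acc ++ [pvAffC (pvParamAInv keyl) (pvParamB keyl) ch]) _ ?_).trans ?_
  · intro acc ch _
    simp only [pvAffC, pvAFF, pvParamAInv, pvParamA, pvParamB,
      show (("ABCDEFGHIJKLMNOPQRSTUVWXYZ0123456789 ".toList).length : Int) = 37 from by decide]
    split <;> rfl
  · rw [PySem.List.foldl_append_singleton_eq_map]
    simp

-- the key-expansion loop, unrolled: one application of the loop body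
lemma pvExpandirIter (keyl : List Char) (hk : keyl ≠ []) :
    ∀ (n : Nat) (j : Nat) (acc : List Char), j < keyl.length →
    (fun (st : List Char × Int) =>
        (st.1 ++ [PySem.List.pyGetD keyl st.2 ' '],
         PySem.Int.mod (st.2 + 1) (keyl.length : Int)))^[n] (acc, (j : Int))
      = (acc ++ (List.range n).map (fun i => keyl.getD ((j + i) % keyl.length) ' '),
         (((j + n) % keyl.length : Nat) : Int)) := by
  have hlk : 0 < keyl.length := List.length_pos_of_ne_nil hk
  intro n
  induction n with
  | zero =>
    intro j acc hj
    simp [Nat.mod_eq_of_lt hj]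
  | succ n ih =>
    intro j acc hj
    rw [Function.iterate_succ_apply]
    have h1 : ((j : Int) + 1) = (((j + 1 : Nat)) : Int) := by push_cast; ring
    have h2 : PySem.Int.mod ((j : Int) + 1) (keyl.length : Int)
        = (((j + 1) % keyl.length : Nat) : Int) := by
      rw [h1, PySem.Int.mod_natCast]
    simp only [PySem.List.pyGetD_natCast, h2]
    rw [ih ((j + 1) % keyl.length) _ (Nat.mod_lt _ hlk)]
    simp only [Prod.mk.injEq]
    refine ⟨?_, by rw [Nat.mod_add_mod, show j + 1 + n = j + (n + 1) from by omega]⟩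
    rw [List.range_succ_eq_map]
    simp only [List.map_cons, List.map_map, List.append_assoc, List.singleton_append]
    have hmap : ∀ i ∈ List.range n,
        keyl.getD (((j + 1) % keyl.length + i) % keyl.length) ' '
          = keyl.getD ((j + (i + 1)) % keyl.length) ' ' := by
      intro i _
      rw [Nat.mod_add_mod, show j + 1 + i = j + (i + 1) from by omega]
    rw [List.map_congr_left hmap]
    have hh : j % keyl.length = j := Nat.mod_eq_of_lt hj
    simp [hh]

-- a loop over constant state steps is function iteration
lemma pvFoldlConst {α β : Type} (f : β → β) : ∀ (l : List α) (st : β),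
    l.foldl (fun st _ => f st) st = f^[l.length] st := by
  intro l
  induction l with
  | nil => intro st; simp
  | cons x xs ih => intro st; simp [ih, Function.iterate_succ_apply]

-- expandir: character i of the expanded key is key[i % len(key)]
lemma pvExpandir_eq (s keyl : List Char) (hk : keyl ≠ []) :
    pvExpandir s keyl
      = (List.range s.length).map (fun i => keyl.getD (i % keyl.length) ' ') := by
  unfold pvExpandir
  rw [pvFoldlConst, PySem.List.length_pyRange_one]
  have h0 : (([] : List Char), (0 : Int)) = (([] : List Char), ((0 : Nat) : Int)) := rfl
  rw [h0, pvExpandirIter keyl hk _ 0 [] (List.length_pos_of_ne_nil hk)]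
  simp only [List.nil_append, Int.sub_zero, Int.toNat_natCast, Nat.zero_add]

-- an index loop 'for i in range(n): acc += [g(i)]' is a map over range n
lemma pvIndexLoopMap (n : Nat) (body : List Char → Int → List Char) (g : Nat → Char)
    (hb : ∀ (acc : List Char) (k : Nat), k < n → body acc (k : Int) = acc ++ [g k]) :
    (PySem.List.pyRange 0 (n : Int)).foldl body [] = (List.range n).map g := by
  rw [PySem.List.foldl_congr_mem _ body (fun acc i => acc ++ [g i.toNat]) []
    (by intro acc x hx
        have hx' := (PySem.List.mem_pyRange_one).mp hx
        have hxx : x = ((x.toNat : Nat) : Int) := (Int.toNat_of_nonneg hx'.1).symm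
        rw [hxx, hb acc x.toNat (by omega)]
        simp
        congr 1
        omega)]
  rw [PySem.List.foldl_append_singleton_eq_map, PySem.List.pyRange_one]
  simp only [List.nil_append, List.map_map, Int.sub_zero, Int.toNat_natCast]
  apply List.map_congr_left
  intro k hk
  simp

-- vigenere as an indexed map
lemma pvVigenere_eq (s keyl : List Char) (hk : keyl ≠ []) :
    pvVigenere s keyl
      = (List.range s.length).map
          (fun i => pvVigC (s.getD i ' ') (keyl.getD (i % keyl.length) ' ')) := by
  unfold pvVigenere
  rw [pvExpandir_eq s keyl hk]
  refine pvIndexLoopMap s.length _ _ ?_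
  intro acc k hkn
  rw [PySem.List.pyGetD_natCast, PySem.List.pyGetD_natCast,
    PySem.List.getD_map_range _ _ _ _ hkn]
  rfl

-- flatten of a replicated key indexes cyclically
lemma pvFlattenReplicate (keyl : List Char) :
    ∀ (t : Nat) (i : Nat), i < keyl.length * t →
      (List.replicate t keyl).flatten[i]? = keyl[i % keyl.length]? := by
  intro t
  induction t with
  | zero => intro i hi; simp at hi
  | succ t ih =>
    intro i hi
    rw [List.replicate_succ, List.flatten_cons]
    by_cases h : i < keyl.length
    · rw [List.getElem?_append_left h, Nat.mod_eq_of_lt h]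
    · push Not at h
      rw [List.getElem?_append_right h]
      have hms : keyl.length * (t + 1) = keyl.length * t + keyl.length := Nat.mul_succ _ _
      rw [ih (i - keyl.length) (by omega)]
      rw [Nat.mod_eq_sub_mod h]

-- the sliced repeated key reads key[i % len(key)]
lemma pvRepeatSlice (keyl : List Char) (hk : keyl ≠ []) (n i : Nat) (hi : i < n) :
    PySem.List.pyGetD
      (PySem.List.slice
        (PySem.List.pyRepeat keyl (PySem.Int.floordiv (n : Int) (keyl.length : Int) + 1))
        none (some (n : Int))) (i : Int) ' '
      = keyl.getD (i % keyl.length) ' ' := by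
  have hlk : 0 < keyl.length := List.length_pos_of_ne_nil hk
  rw [PySem.List.slice_to_natCast]
  rw [PySem.Int.floordiv_natCast]
  rw [show ((((n / keyl.length : Nat)) : Int) + 1) = (((n / keyl.length + 1 : Nat)) : Int) from by
    push_cast; ring]
  rw [PySem.List.pyGetD_natCast]
  rw [List.getD_eq_getElem?_getD, List.getD_eq_getElem?_getD]
  rw [List.getElem?_take_of_lt hi]
  rw [show PySem.List.pyRepeat keyl ((((n / keyl.length + 1 : Nat)) : Int))
      = (List.replicate (n / keyl.length + 1) keyl).flatten from by
    rw [PySem.List.pyRepeat.eq_def, Int.toNat_natCast]]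
  rw [pvFlattenReplicate keyl _ i ?_]
  have h1 := Nat.div_add_mod n keyl.length
  have h2 := Nat.mod_lt n hlk
  rw [Nat.mul_succ]
  omega

-- alberti as an indexed map
lemma pvAlberti_eq (s keyl : List Char) (hk : keyl ≠ []) :
    pvAlberti s keyl
      = (List.range s.length).map
          (fun i => pvAlbC (keyl.getD (i % keyl.length) ' ') (s.getD i ' ')) := by
  unfold pvAlberti
  refine pvIndexLoopMap s.length _ _ ?_
  intro acc k hkn
  simp only [PySem.List.pyGetD_natCast, pvRepeatSlice keyl hk s.length k hkn]
  simp only [pvAlbC, pvALB,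
    show (("ABCDEFGHIJKLMNOPQRSTUVWXYZ0123456789".toList).length : Int) = 36 from by decide]
  split <;> rfl

-- one round (vigenere; affine; alberti) as an indexed map
lemma pvRound_eq (s keyl : List Char) (hk : keyl ≠ []) :
    pvAlberti (pvAffine (pvVigenere s keyl) keyl) keyl
      = (List.range s.length).map (fun i =>
          pvAlbC (keyl.getD (i % keyl.length) ' ')
            (pvAffC (pvParamAInv keyl) (pvParamB keyl)
              (pvVigC (s.getD i ' ') (keyl.getD (i % keyl.length) ' ')))) := by
  rw [pvVigenere_eq s keyl hk, pvAffine_eq, pvAlberti_eq _ keyl hk]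
  rw [List.map_map, List.length_map, List.length_range]
  apply List.map_congr_left
  intro i hi
  rw [List.mem_range] at hi
  rw [PySem.List.getD_map_range _ _ _ _ hi]
  rfl

-- two rounds as an indexed map of pvG
lemma pvTwoRounds_eq (s keyl : List Char) (hk : keyl ≠ []) :
    (PySem.List.pyRange 0 2).foldl
        (fun b _ => pvAlberti (pvAffine (pvVigenere b keyl) keyl) keyl) s
      = (List.range s.length).map (fun i => pvG keyl i (s.getD i ' ')) := by
  rw [show PySem.List.pyRange 0 2 = [0, 1] from by decide]
  simp only [List.foldl_cons, List.foldl_nil]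
  rw [pvRound_eq s keyl hk, pvRound_eq _ keyl hk]
  rw [List.length_map, List.length_range]
  apply List.map_congr_left
  intro i hi
  rw [List.mem_range] at hi
  rw [PySem.List.getD_map_range _ _ _ _ hi]
  rfl

-- concatenating per-block results: canonical chunks
lemma pvChunksAux (G : Nat → Char → Char) :
    ∀ (m : Nat) (tl : List Char), tl.length ≤ 16 * m →
      ((List.range m).map (fun q => (tl.drop (16 * q)).take 16)).flatMap
        (fun bl => (List.range bl.length).map (fun j => G j (bl.getD j ' ')))
      = (List.range tl.length).map (fun i => G (i % 16) (tl.getD i ' ')) := by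
  intro m
  induction m with
  | zero =>
    intro tl h
    have : tl = [] := List.length_eq_zero_iff.mp (by omega)
    subst this; simp
  | succ m ih =>
    intro tl h
    rw [List.range_succ_eq_map]
    simp only [List.map_cons, List.map_map, List.flatMap_cons, Nat.mul_zero, List.drop_zero]
    have hshift : (List.range m).map
          (fun q => ((fun q => (tl.drop (16 * q)).take 16) ∘ Nat.succ) q)
        = (List.range m).map (fun q => (((tl.drop 16).drop (16 * q)).take 16)) := by
      apply List.map_congr_left
      intro q _
      simp only [Function.comp_apply, List.drop_drop]
      congr 2
      omega
    rw [hshift, ih (tl.drop 16) (by simp; omega)]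
    have hsplit : tl.length = min 16 tl.length + (tl.length - min 16 tl.length) := by omega
    rw [hsplit, List.range_add, List.map_append]
    rw [List.length_take, List.length_drop, List.map_map]
    congr 1
    · apply List.map_congr_left
      intro j hj
      rw [List.mem_range] at hj
      rw [Nat.mod_eq_of_lt (by omega)]
      congr 1
      rw [List.getD_eq_getElem?_getD, List.getD_eq_getElem?_getD,
        List.getElem?_take_of_lt (by omega)]
    · by_cases h16 : tl.length ≤ 16
      · rw [show tl.length - 16 = 0 from by omega,
          show tl.length - min 16 tl.length = 0 from by omega]
        simp
      · rw [show min 16 tl.length = 16 from by omega]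
        apply List.map_congr_left
        intro j _
        simp only [Function.comp_apply]
        rw [Nat.add_mod_left]
        congr 1
        rw [List.getD_eq_getElem?_getD, List.getD_eq_getElem?_getD, List.getElem?_drop]

-- A's 16-char slicing loop gives the global indexed map with index i % 16
lemma pvChunks_eq (G : Nat → Char → Char) (tl : List Char) :
    ((PySem.List.pyRange 0 (tl.length : Int) 16).map
        (fun i => PySem.List.slice tl (some i) (some (i + 16)))).foldl
      (fun acc bl => acc ++ (List.range bl.length).map (fun j => G j (bl.getD j ' '))) []
      = (List.range tl.length).map (fun i => G (i % 16) (tl.getD i ' ')) := by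
  rw [PySem.List.foldl_append_eq_flatMap, List.nil_append]
  have hchunks : (PySem.List.pyRange 0 (tl.length : Int) 16).map
        (fun i => PySem.List.slice tl (some i) (some (i + 16)))
      = (List.range ((tl.length + 15) / 16)).map (fun q => (tl.drop (16 * q)).take 16) := by
    rw [PySem.List.pyRange_of_pos _ _ (by norm_num : (0:Int) < 16), List.map_map]
    by_cases h0 : (0:Int) < (tl.length : Int)
    · rw [if_pos h0]
      have hcount : (((tl.length : Int) - 0 + 16 - 1) / 16).toNat = (tl.length + 15) / 16 := by
        omega
      rw [hcount]
      apply List.map_congr_left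
      intro q _
      simp only [Function.comp_apply, Int.zero_add]
      have hcast : (16 : Int) * (q : Int) = ((16 * q : Nat) : Int) := by push_cast; ring
      have hcast2 : (((16 * q : Nat)) : Int) + 16 = (((16 * q + 16) : Nat) : Int) := by
        push_cast; ring
      rw [hcast, hcast2, PySem.List.slice_natCast]
      congr 1
      omega
    · rw [if_neg h0]
      have : tl.length = 0 := by omega
      rw [this]
      simp
  rw [hchunks]
  exact pvChunksAux G ((tl.length + 15) / 16) tl (by omega)

-- A computes the global indexed map
lemma pvA_eq (text key : String) (hk : key.toList ≠ []) :
    decifra_texto_bloco text key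
      = String.ofList ((List.range text.toList.length).map
          (fun i => pvG key.toList (i % 16) (text.toList.getD i ' '))) := by
  simp only [decifra_texto_bloco]
  congr 1
  rw [PySem.List.foldl_congr_mem _ _
    (fun acc bl => acc ++ (List.range bl.length).map (fun j => pvG key.toList j (bl.getD j ' ')))
    [] (by intro acc bl _; rw [pvTwoRounds_eq bl key.toList hk])]
  exact pvChunks_eq (pvG key.toList) text.toList

-- dictionary built by inserting a value for every listed key: lookup of a listed key
lemma pvDictLookupAux (g : Char → Char) :
    ∀ (l : List Char) (d : PySem.Dict Char Char) (c : Char) (d0 : Char),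
      (l.foldl (fun d x => d.insert x (g x)) d).getD c d0
        = if c ∈ l then g c else d.getD c d0 := by
  intro l
  induction l with
  | nil => intro d c d0; simp
  | cons x xs ih =>
    intro d c d0
    rw [List.foldl_cons, ih]
    by_cases hc : c ∈ xs
    · simp [hc]
    · by_cases hcx : c = x
      · subst hcx
        simp [hc]
      · simp [hc, hcx, PySem.Dict.getD_insert]

-- B computes the global indexed map
lemma pvB_eq (text key : String) :
    decifra_texto_bloco_alt text key
      = String.ofList ((List.range text.toList.length).map
          (fun i => pvG key.toList (i % 16) (text.toList.getD i ' '))) := by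
  simp only [decifra_texto_bloco_alt]
  by_cases htl : text.toList = []
  · rw [if_pos htl, htl]
    rfl
  · rw [if_neg htl]
    congr 1
    rw [PySem.List.enumerate_eq_map_pyRange text.toList ' ', List.map_map,
      PySem.List.pyRange_one 0 (PySem.List.len text.toList)]
    simp only [List.map_map, PySem.List.len_eq, Int.sub_zero, Int.toNat_natCast]
    apply List.map_congr_left
    intro i hi
    rw [List.mem_range] at hi
    simp only [Function.comp_apply, Int.zero_add]
    rw [show PySem.Int.mod ((i : Nat) : Int) 16 = (((i % 16 : Nat)) : Int) from
      PySem.Int.mod_natCast i 16]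
    rw [PySem.List.pyGetD_natCast text.toList i ' ']
    rw [PySem.List.pyGetD_map_pyRange_of_nonneg _ 16 _ _ (by positivity)
      (by exact_mod_cast Nat.mod_lt i (by norm_num))]
    rw [show PySem.Int.mod (((i % 16 : Nat)) : Int) (key.toList.length : Int)
        = (((i % 16 % key.toList.length : Nat)) : Int) from PySem.Int.mod_natCast _ _]
    rw [PySem.List.pyGetD_natCast]
    rw [pvDictLookupAux _ (PySem.Set.ofList text.toList) PySem.Dict.empty _ ' ']
    rw [if_pos (by
      rw [PySem.Set.mem_ofList]
      rw [List.getD_eq_getElem?_getD, List.getElem?_eq_getElem hi]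
      exact List.getElem_mem hi)]
    simp only [show "ABCDEFGHIJKLMNOPQRSTUVWXYZ0123456789".toList = pvALB from rfl,
      show pvALB ++ [' '] = pvAFF from by decide,
      show ((pvAFF.length : Nat) : Int) = 37 from by decide]
    rw [pvbRound_eq, pvbRound_eq]
    simp only [pvG, pvParamAInv, pvParamA, pvParamB]

-- ===== VERDICT (by name: the statement is the Claim_ definition above) =====
theorem decifra_texto_bloco_spec : Claim_equal_decifra_texto_bloco := by
  intro text key _ hpre
  unfold Spec_decifra_texto_bloco
  rcases hpre with hk | ht
  · rw [pvA_eq text key hk, pvB_eq text key]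
  · simp only [decifra_texto_bloco, decifra_texto_bloco_alt, ht, if_pos]
    rfl
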